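-- pv_equiv track=rewrite | github.com/etssu/prog1 | exam_prep.py | F
-- ===== SOURCE A (Python) =====
-- def F(A):
--     pocet = 0
--     for j in range(len(A[0])): #stlpec
--         all_zero = True
--         for i in range(len(A)): #riadok
--             if A[i][j] != 0:
--                 all_zero = False
--                 break
--         if all_zero == True:
--             pocet +=1
--     return pocet
-- ===== SOURCE B (Python) =====
-- def F(A):
--     remaining = list(range(len(A[0])))
--     for row in A:
--         remaining = [j for j in remaining if row[j] == 0]
--     return len(remaining)
-- ===== Notes on version B (the rewrite author's own statement) =====
-- stated objective: alternative
-- what changed: Replaces the column-major nested loops (for each column, scan all rows) with a single row-major pass that filters a shrinking list of candidate all-zero column indices, returning its final length.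
import Mathlib
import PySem

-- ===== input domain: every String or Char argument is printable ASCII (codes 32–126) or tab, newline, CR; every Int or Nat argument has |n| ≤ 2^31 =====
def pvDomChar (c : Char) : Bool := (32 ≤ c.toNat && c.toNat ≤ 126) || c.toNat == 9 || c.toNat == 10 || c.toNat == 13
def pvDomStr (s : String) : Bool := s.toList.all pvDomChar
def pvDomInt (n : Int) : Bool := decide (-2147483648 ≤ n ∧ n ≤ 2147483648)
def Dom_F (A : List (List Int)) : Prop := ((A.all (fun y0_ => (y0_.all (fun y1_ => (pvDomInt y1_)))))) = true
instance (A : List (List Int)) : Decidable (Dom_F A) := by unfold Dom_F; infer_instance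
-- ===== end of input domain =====

-- B is a row-major single pass filtering a shrinking list of candidate all-zero columns,
-- replacing A's column-major nested loops; return values agree on all of Pre_.

-- ===== PORT A =====
-- inner loop 'for i in range(len(A)): if A[i][j] != 0: all_zero = False; break'
def aColF (rows : List (List Int)) (j : Int) : Bool :=
  match rows with
  | [] => true
  | r :: rs => if PySem.List.pyGetD r j 0 ≠ 0 then false else aColF rs j

def F (A : List (List Int)) : Int :=
  let cols := ((PySem.List.pyGet? A 0).getD []).length
  (PySem.List.pyRange 0 cols 1).foldl
    (fun pocet j => if aColF A j then pocet + 1 else pocet) 0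

-- ===== PORT B =====
def F_alt (A : List (List Int)) : Int :=
  let cols := ((PySem.List.pyGet? A 0).getD []).length
  let remaining := A.foldl
    (fun rem row => rem.filter (fun j => PySem.List.pyGetD row j 0 == 0))
    (PySem.List.pyRange 0 cols 1)
  (remaining.length : Int)

-- ===== PRECONDITION & SPEC =====
-- Pre_ excludes exactly the inputs where Python A raises IndexError: empty A (A[0]), and
-- ragged matrices in which some column scan reaches a too-short row before any nonzero
-- entry breaks it (B raises IndexError on exactly the same inputs).
def Pre_F (A : List (List Int)) : Prop :=
  A ≠ [] ∧ ∀ i < A.length, ∀ j < (A.headD []).length,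
    (A.getD i []).length ≤ j →
      ∃ i' < i, j < (A.getD i' []).length ∧ (A.getD i' []).getD j 0 ≠ 0
instance (A : List (List Int)) : Decidable (Pre_F A) := by unfold Pre_F; infer_instance

def pvWitness_F : List (List Int) := [[0, 1], [0, 0]]

def Spec_F (A : List (List Int)) (out : Int) : Prop := out = F_alt A
instance (A : List (List Int)) (out : Int) : Decidable (Spec_F A out) := by unfold Spec_F; infer_instance

-- ===== CLAIM (what is proved, stated in full; the proofs are below) =====
def Claim_equal_F : Prop := ∀ (A : List (List Int)), Dom_F A → Pre_F A → Spec_F A (F A)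

-- ===== LEMMAS AND PROOFS =====
lemma aColF_eq_all (rows : List (List Int)) (j : Int) :
    aColF rows j = rows.all (fun row => PySem.List.pyGetD row j 0 == 0) := by
  induction rows with
  | nil => rfl
  | cons r rs ih =>
    simp [aColF, ih]
    by_cases h : PySem.List.pyGetD r j 0 = 0 <;> simp [h]

lemma fold_filter_eq (rows : List (List Int)) (init : List Int) :
    rows.foldl (fun rem row => rem.filter (fun j => PySem.List.pyGetD row j 0 == 0)) init
      = init.filter (fun j => rows.all (fun row => PySem.List.pyGetD row j 0 == 0)) := by
  induction rows generalizing init with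
  | nil => simp
  | cons r rs ih =>
    simp only [List.foldl_cons, ih, List.filter_filter, List.all_cons]
    congr 1
    funext j
    exact (Bool.and_comm _ _)

lemma count_fold_eq (l : List Int) (p : Int → Bool) (c : Int) :
    l.foldl (fun pocet j => if p j then pocet + 1 else pocet) c
      = c + ((l.filter p).length : Int) := by
  induction l generalizing c with
  | nil => simp
  | cons x xs ih =>
    by_cases h : p x <;> simp [h, ih] <;> ring

-- ===== VERDICT (by name: the statement is the Claim_ definition above) =====
theorem F_spec : Claim_equal_F := by
  intro A _ _
  unfold Spec_F F F_alt
  dsimp only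
  rw [fold_filter_eq, count_fold_eq]
  simp only [zero_add]
  congr 2
  exact List.filter_congr fun j _ => aColF_eq_all A j
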